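-- pv_equiv track=rewrite | github.com/tommotom/LeetCode | Explore/June-LeetCoding-Challenge/0617/Solution.py | numSubarrayBoundedMax
-- ===== SOURCE A (Python) =====
-- from typing import List
--
-- def numSubarrayBoundedMax(nums: List[int], left: int, right: int) -> int:
--     n = len(nums)
--     dp = [0 for _ in range(n)]
--     lastOver = -1
--     for i in range(n):
--         if right < nums[i]:
--             lastOver = i
--         else:
--             if left <= nums[i]:
--                 dp[i] += i - lastOver
--             elif i > 0:
--                 dp[i] += dp[i-1]
--     return sum(dp)
-- ===== SOURCE B (Python) =====
-- def numSubarrayBoundedMax(nums, left, right):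
--     def count_at_most(bound):
--         # number of subarrays whose maximum is <= bound:
--         # running length of the current run of elements <= bound,
--         # added to the total at every position.
--         total = 0
--         streak = 0
--         for x in nums:
--             if x <= bound:
--                 streak += 1
--                 total += streak
--             else:
--                 streak = 0
--         return total
--     return count_at_most(right) - count_at_most(left - 1)
-- ===== Notes on version B (the rewrite author's own statement) =====
-- stated objective: simpler
-- what changed: Replaces the dp array plus lastOver index with two independent streak-counting passes, returning countAtMost(right) - countAtMost(left-1).
-- outside the precondition, e.g. on numSubarrayBoundedMax([3], 5, 2): A returns 0, B returns -1
import Mathlib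
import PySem

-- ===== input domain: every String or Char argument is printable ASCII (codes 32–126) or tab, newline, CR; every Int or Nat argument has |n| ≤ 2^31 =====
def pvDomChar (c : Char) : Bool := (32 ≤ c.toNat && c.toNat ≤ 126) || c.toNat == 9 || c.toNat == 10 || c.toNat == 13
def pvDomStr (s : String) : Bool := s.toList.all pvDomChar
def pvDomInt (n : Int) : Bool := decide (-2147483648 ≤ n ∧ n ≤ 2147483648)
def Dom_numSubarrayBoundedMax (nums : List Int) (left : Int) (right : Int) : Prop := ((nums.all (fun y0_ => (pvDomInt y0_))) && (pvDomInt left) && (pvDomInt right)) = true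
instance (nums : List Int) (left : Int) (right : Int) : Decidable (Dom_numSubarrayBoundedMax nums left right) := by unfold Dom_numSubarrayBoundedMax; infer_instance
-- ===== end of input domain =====

-- B replaces A's dp array + lastOver index with two independent streak-counting passes
-- (countAtMost(right) - countAtMost(left-1)): same O(n) time, O(1) space, simpler code.


-- ===== PORT A =====
-- the body of A's `for i in range(n)` loop; state = (dp, lastOver)
def stepA (nums : List Int) (left right : Int) (st : List Int × Int) (i : Int) : List Int × Int :=
  if right < PySem.List.pyGetD nums i 0 then (st.1, i)
  else if left ≤ PySem.List.pyGetD nums i 0 then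
    (PySem.List.pySetD st.1 i (PySem.List.pyGetD st.1 i 0 + (i - st.2)), st.2)
  else if 0 < i then
    (PySem.List.pySetD st.1 i (PySem.List.pyGetD st.1 i 0 + PySem.List.pyGetD st.1 (i - 1) 0), st.2)
  else st

def numSubarrayBoundedMax (nums : List Int) (left : Int) (right : Int) : Int :=
  let n : Int := nums.length
  let dp : List Int := (PySem.List.pyRange 0 n 1).map (fun _ => (0 : Int))
  let st := (PySem.List.pyRange 0 n 1).foldl (stepA nums left right) (dp, -1)
  st.1.sum

-- ===== PORT B =====
-- Source B's count_at_most: one pass, state = (total, streak)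
def countAtMost (nums : List Int) (bound : Int) : Int :=
  (nums.foldl (fun (st : Int × Int) x =>
      if x ≤ bound then (st.1 + (st.2 + 1), st.2 + 1) else (st.1, 0)) (0, 0)).1

def numSubarrayBoundedMax_alt (nums : List Int) (left : Int) (right : Int) : Int :=
  countAtMost nums right - countAtMost nums (left - 1)

-- ===== PRECONDITION & SPEC =====
-- Pre_ excludes left > right, a degenerate out-of-contract query (LeetCode guarantees
-- left ≤ right) on which A's dp accidentally stays 0 while B's subtraction identity
-- does not apply; both values there are artefacts of an unspecified corner.
def Pre_numSubarrayBoundedMax (nums : List Int) (left : Int) (right : Int) : Prop := left ≤ right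
instance (nums : List Int) (left : Int) (right : Int) : Decidable (Pre_numSubarrayBoundedMax nums left right) := by unfold Pre_numSubarrayBoundedMax; infer_instance
def pvWitness_numSubarrayBoundedMax : List Int × Int × Int := ([2, 1, 4, 3], 2, 3)

def Spec_numSubarrayBoundedMax (nums : List Int) (left : Int) (right : Int) (out : Int) : Prop := out = numSubarrayBoundedMax_alt nums left right
instance (nums : List Int) (left : Int) (right : Int) (out : Int) : Decidable (Spec_numSubarrayBoundedMax nums left right out) := by unfold Spec_numSubarrayBoundedMax; infer_instance

-- ===== CLAIM (what is proved, stated in full; the proofs are below) =====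
def Claim_equal_numSubarrayBoundedMax : Prop := ∀ (nums : List Int) (left : Int) (right : Int), Dom_numSubarrayBoundedMax nums left right → Pre_numSubarrayBoundedMax nums left right → Spec_numSubarrayBoundedMax nums left right (numSubarrayBoundedMax nums left right)

-- ===== LEMMAS AND PROOFS =====

-- abbreviations for the two loops (definitionally equal to the ports' bodies)
def runA (nums : List Int) (left right : Int) : List Int × Int :=
  (PySem.List.pyRange 0 (nums.length : Int) 1).foldl (stepA nums left right)
    ((PySem.List.pyRange 0 (nums.length : Int) 1).map (fun _ => (0 : Int)), -1)

def runB (nums : List Int) (bound : Int) : Int × Int :=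
  nums.foldl (fun (st : Int × Int) x =>
      if x ≤ bound then (st.1 + (st.2 + 1), st.2 + 1) else (st.1, 0)) (0, 0)

-- step preserves dp length
lemma stepA_length (nums : List Int) (l r : Int) (st : List Int × Int) (i : Int) :
    (stepA nums l r st i).1.length = st.1.length := by
  unfold stepA; split_ifs <;> simp [PySem.List.length_pySetD]

-- pyGetD on an extended list, index strictly inside the prefix
lemma pyGetD_append_left (xs : List Int) (x : Int) (j : Int) (h0 : 0 ≤ j) (h : j < (xs.length : Int)) :
    PySem.List.pyGetD (xs ++ [x]) j 0 = PySem.List.pyGetD xs j 0 := by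
  rw [PySem.List.pyGetD_eq_getElem _ _ h0 (by simp; omega),
      PySem.List.pyGetD_eq_getElem _ _ h0 (by simpa using h)]
  exact List.getElem_append_left (by omega)

lemma pySetD_append_left (d : List Int) (x v : Int) (j : Int) (h0 : 0 ≤ j) (h : j < (d.length : Int)) :
    PySem.List.pySetD (d ++ [x]) j v = PySem.List.pySetD d j v ++ [x] := by
  rw [PySem.List.pySetD_of_nonneg _ _ h0, PySem.List.pySetD_of_nonneg _ _ h0,
      List.set_append_left _ _ (by omega)]

lemma stepA_ext (xs : List Int) (x l r : Int) (j : Int) (h0 : 0 ≤ j) (h : j < (xs.length : Int))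
    (d : List Int) (hd : d.length = xs.length) (lo : Int) :
    stepA (xs ++ [x]) l r (d ++ [0], lo) j =
      ((stepA xs l r (d, lo) j).1 ++ [0], (stepA xs l r (d, lo) j).2) := by
  unfold stepA
  rw [pyGetD_append_left xs x j h0 h]
  have hdj : j < (d.length : Int) := by rw [hd]; exact h
  split_ifs with h1 h2 h3
  · rfl
  · simp [pyGetD_append_left d 0 j h0 hdj, pySetD_append_left d 0 _ j h0 hdj]
  · simp [pyGetD_append_left d 0 j h0 hdj, pySetD_append_left d 0 _ j h0 hdj,
          pyGetD_append_left d 0 (j-1) (by omega) (by omega)]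
  · rfl

lemma foldA_ext (xs : List Int) (x l r : Int) (js : List Int)
    (hjs : ∀ j ∈ js, 0 ≤ j ∧ j < (xs.length : Int)) :
    ∀ (d : List Int) (lo : Int), d.length = xs.length →
    js.foldl (stepA (xs ++ [x]) l r) (d ++ [0], lo) =
      ((js.foldl (stepA xs l r) (d, lo)).1 ++ [0], (js.foldl (stepA xs l r) (d, lo)).2) := by
  induction js with
  | nil => intro d lo _; rfl
  | cons j js ih =>
    intro d lo hd
    have hj := hjs j (by simp)
    have hrec := stepA_ext xs x l r j hj.1 hj.2 d hd lo
    simp only [List.foldl_cons, hrec]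
    have : (stepA xs l r (d, lo) j).1.length = xs.length := by
      rw [stepA_length]; exact hd
    exact ih (fun j hj => hjs j (by simp [hj])) _ _ this

lemma runA_snoc (xs : List Int) (x l r : Int) :
    runA (xs ++ [x]) l r =
      stepA (xs ++ [x]) l r ((runA xs l r).1 ++ [0], (runA xs l r).2) (xs.length : Int) := by
  unfold runA
  have hlen : ((xs ++ [x]).length : Int) = (xs.length : Int) + 1 := by push_cast [List.length_append]; simp
  rw [hlen, PySem.List.pyRange_one_succ_right (by positivity)]
  rw [show (List.map (fun _ => (0:Int)) (PySem.List.pyRange 0 ((xs.length:Int)) ++ [(xs.length:Int)])) =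
        List.map (fun _ => (0:Int)) (PySem.List.pyRange 0 ((xs.length:Int))) ++ [0] by
      rw [List.map_append]; rfl]
  rw [List.foldl_append]
  rw [foldA_ext xs x l r _ (fun j hj => by
        have := (PySem.List.mem_pyRange_one).1 hj; exact ⟨this.1, this.2⟩)
      _ _ (by simp [PySem.List.length_pyRange_one])]
  rfl

lemma runB_snoc (xs : List Int) (x b : Int) :
    runB (xs ++ [x]) b =
      if x ≤ b then ((runB xs b).1 + ((runB xs b).2 + 1), (runB xs b).2 + 1)
      else ((runB xs b).1, 0) := by
  unfold runB; rw [List.foldl_append]; rfl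

lemma pyGetD_concat_length (d : List Int) (x : Int) :
    PySem.List.pyGetD (d ++ [x]) (d.length : Int) 0 = x := by
  rw [PySem.List.pyGetD_eq_getElem _ _ (by positivity) (by simp)]
  exact List.getElem_concat_length (by simp) _

lemma set_concat_length (d : List Int) (v : Int) :
    (d ++ [(0 : Int)]).set ((d.length : Int)).toNat v = d ++ [v] := by
  rw [List.set_append_right _ _ (by simp), Int.toNat_natCast]
  simp

theorem mainInv (l r : Int) (hlr : l ≤ r) (xs : List Int) :
    (runA xs l r).1.length = xs.length ∧
    (runA xs l r).1.sum = (runB xs r).1 - (runB xs (l - 1)).1 ∧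
    PySem.List.pyGetD (runA xs l r).1 ((xs.length : Int) - 1) 0 = (runB xs r).2 - (runB xs (l - 1)).2 ∧
    (runA xs l r).2 = (xs.length : Int) - 1 - (runB xs r).2 := by
  induction xs using List.reverseRecOn with
  | nil => refine ⟨rfl, rfl, ?_, rfl⟩; rfl
  | append_singleton xs x ih =>
    obtain ⟨ihlen, ihsum, ihlast, ihlo⟩ := ih
    have hx : PySem.List.pyGetD (xs ++ [x]) ((xs.length:Int)) 0 = x := pyGetD_concat_length xs x
    have hd0 : PySem.List.pyGetD ((runA xs l r).1 ++ [0]) ((xs.length:Int)) 0 = 0 := by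
      rw [show (xs.length : Int) = ((runA xs l r).1.length : Int) by rw [ihlen]]
      exact pyGetD_concat_length _ 0
    have hlenx : ((xs ++ [x]).length : Int) = (xs.length:Int) + 1 := by simp
    rw [runA_snoc, runB_snoc, runB_snoc, hlenx]
    unfold stepA
    rw [hx]
    by_cases h1 : r < x
    · -- x > right (hence x > l - 1 too)
      have hxl : ¬ x ≤ l - 1 := by omega
      have hxr : ¬ x ≤ r := by omega
      rw [if_pos h1, if_neg hxr, if_neg hxl]
      refine ⟨by simp [ihlen], by simp [ihsum], ?_, by ring⟩
      simpa using hd0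
    · by_cases h2 : l ≤ x
      · -- left ≤ x ≤ right
        have hxl : ¬ x ≤ l - 1 := by omega
        have hxr : x ≤ r := by omega
        rw [if_neg h1, if_pos h2, if_pos hxr, if_neg hxl]
        have hset : ((runA xs l r).1 ++ [0]).set ((xs.length:Int)).toNat (0 + ((xs.length:Int) - (runA xs l r).2)) =
            (runA xs l r).1 ++ [0 + ((xs.length:Int) - (runA xs l r).2)] := by
          have h := set_concat_length (runA xs l r).1 (0 + ((xs.length:Int) - (runA xs l r).2))
          rwa [ihlen] at h
        rw [PySem.List.pySetD_of_nonneg _ _ (by positivity), hd0, hset]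
        refine ⟨by simp [ihlen], ?_, ?_, by omega⟩
        · rw [List.sum_append]; simp; omega
        · rw [show (xs.length:Int) + 1 - 1 = ((runA xs l r).1.length : Int) by rw [ihlen]; omega]
          rw [pyGetD_concat_length]; omega
      · -- x < left  (hence x ≤ l - 1 ≤ r)
        have hxl : x ≤ l - 1 := by omega
        have hxr : x ≤ r := by omega
        rw [if_neg h1, if_neg h2, if_pos hxr, if_pos hxl]
        by_cases h3 : (0 : Int) < (xs.length:Int)
        · rw [if_pos h3]
          have hprev : PySem.List.pyGetD ((runA xs l r).1 ++ [0]) ((xs.length:Int) - 1) 0 =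
              (runB xs r).2 - (runB xs (l - 1)).2 := by
            rw [pyGetD_append_left _ _ _ (by omega) (by rw [ihlen]; omega)]
            exact ihlast
          have hset : ((runA xs l r).1 ++ [0]).set ((xs.length:Int)).toNat (0 + ((runB xs r).2 - (runB xs (l-1)).2)) =
              (runA xs l r).1 ++ [0 + ((runB xs r).2 - (runB xs (l-1)).2)] := by
            have h := set_concat_length (runA xs l r).1 (0 + ((runB xs r).2 - (runB xs (l-1)).2))
            rwa [ihlen] at h
          rw [PySem.List.pySetD_of_nonneg _ _ (by positivity), hd0, hprev, hset]
          refine ⟨by simp [ihlen], ?_, ?_, by omega⟩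
          · rw [List.sum_append]; simp; omega
          · rw [show (xs.length:Int) + 1 - 1 = ((runA xs l r).1.length : Int) by rw [ihlen]; omega]
            rw [pyGetD_concat_length]; omega
        · -- n = 0: xs = []
          rw [if_neg h3]
          have hxs : xs = [] := by
            have : xs.length = 0 := by omega
            exact List.length_eq_zero_iff.mp this
          subst hxs
          have hrA : runA ([] : List Int) l r = ([], -1) := rfl
          have hrBr : runB ([] : List Int) r = (0, 0) := rfl
          have hrBl : runB ([] : List Int) (l - 1) = (0, 0) := rfl
          rw [hrA, hrBr, hrBl]
          refine ⟨by simp, by simp, ?_, by simp⟩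
          simp

-- ===== VERDICT (by name: the statement is the Claim_ definition above) =====
theorem numSubarrayBoundedMax_spec : Claim_equal_numSubarrayBoundedMax := by
  intro nums l r _ hpre
  unfold Spec_numSubarrayBoundedMax
  have e1 : numSubarrayBoundedMax nums l r = (runA nums l r).1.sum := rfl
  have e2 : numSubarrayBoundedMax_alt nums l r = (runB nums r).1 - (runB nums (l - 1)).1 := rfl
  rw [e1, e2]
  exact (mainInv l r hpre nums).2.1
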